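-- pv_equiv track=rewrite | github.com/egospekos/hitori_puzzle_game | 05170000078 .py | kural_kontrol
-- ===== SOURCE A (Python) =====
-- def kural_kontrol(bilgi_liste):
--     #listedeki bütün B (X) karakterlerinin komşularını kontrol eder
--     length=len(bilgi_liste)
--     for i in range(length):
--         for j in range(length):
--             if bilgi_liste[i][j] == 'B':
--                 if i < 1:
--                     pass
--                 elif bilgi_liste[i - 1][j] == 'B':
--                     return False
--                 if i > length - 2:
--                     pass
--                 elif bilgi_liste[i + 1][j] == 'B':
--                     return False
--                 if  j < 1:
--                     pass
--                 elif bilgi_liste[i][j - 1] == 'B':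
--                     return False
--                 if j > length - 2:
--                     pass
--                 elif bilgi_liste[i][j + 1] == 'B':
--                     return False
--     return True
-- ===== SOURCE B (Python) =====
-- def kural_kontrol(bilgi_liste):
--     length = len(bilgi_liste)
--     bs = set()
--     for i in range(length):
--         for j in range(length):
--             if bilgi_liste[i][j] == 'B':
--                 bs.add((i, j))
--     for (i, j) in bs:
--         if (i + 1, j) in bs or (i, j + 1) in bs:
--             return False
--     return True
-- ===== Notes on version B (the rewrite author's own statement) =====
-- stated objective: alternative
-- what changed: Replaces A's inline four-direction boundary-guarded neighbour checks with a two-pass strategy: first collect the set of (i,j) coordinates of 'B' cells, then check only the forward neighbours (i+1,j) and (i,j+1) of each collected cell, which suffices by symmetry.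
-- outside the precondition, e.g. on kural_kontrol([['B', 'B'], ['x']]): A returns False, B raises IndexError
import Mathlib
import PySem

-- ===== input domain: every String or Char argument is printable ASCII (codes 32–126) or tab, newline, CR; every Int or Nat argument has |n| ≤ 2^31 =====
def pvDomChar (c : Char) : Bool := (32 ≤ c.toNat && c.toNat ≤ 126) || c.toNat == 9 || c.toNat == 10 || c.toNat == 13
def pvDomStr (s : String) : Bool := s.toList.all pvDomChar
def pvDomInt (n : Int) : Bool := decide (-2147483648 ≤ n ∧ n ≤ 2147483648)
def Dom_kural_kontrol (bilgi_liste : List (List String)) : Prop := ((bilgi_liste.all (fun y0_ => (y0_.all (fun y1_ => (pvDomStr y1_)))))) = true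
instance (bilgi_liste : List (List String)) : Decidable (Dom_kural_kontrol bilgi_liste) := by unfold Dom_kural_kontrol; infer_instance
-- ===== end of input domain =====

-- B replaces A's inline four-direction boundary-guarded neighbour scan by a two-pass
-- collect-then-membership strategy (build the set of 'B' coordinates, then check only the
-- forward neighbours (i+1,j) and (i,j+1) of each, exploiting symmetry); same cost, clearer.
-- Equivalence is about the RETURN value; neither version mutates its argument.

-- pvCell g i j = bilgi_liste[i][j]; under Pre_ every access made by either program is in range,
-- so the total getD form is exact there.
def pvCell (g : List (List String)) (i j : Nat) : String := (g.getD i []).getD j ""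

-- ===== PORT A =====
def kural_kontrol (bilgi_liste : List (List String)) : Bool :=
  let n := bilgi_liste.length
  (List.range n).all fun i =>
    (List.range n).all fun j =>
      if pvCell bilgi_liste i j == "B" then
        (if (i : Int) < 1 then true else !(pvCell bilgi_liste (i - 1) j == "B")) &&
        (if (i : Int) > (n : Int) - 2 then true else !(pvCell bilgi_liste (i + 1) j == "B")) &&
        (if (j : Int) < 1 then true else !(pvCell bilgi_liste i (j - 1) == "B")) &&
        (if (j : Int) > (n : Int) - 2 then true else !(pvCell bilgi_liste i (j + 1) == "B"))
      else true

-- ===== PORT B =====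
def kural_kontrol_alt (bilgi_liste : List (List String)) : Bool :=
  let n := bilgi_liste.length
  let bs : PySem.Set (Nat × Nat) :=
    (List.range n).foldl (fun s i =>
      (List.range n).foldl (fun s j =>
        if pvCell bilgi_liste i j == "B" then PySem.Set.add s (i, j) else s) s)
      PySem.Set.empty
  bs.all fun p =>
    !(PySem.Set.contains bs (p.1 + 1, p.2) || PySem.Set.contains bs (p.1, p.2 + 1))

-- ===== PRECONDITION & SPEC =====
-- Pre_ excludes ragged grids (a row shorter than the grid's row count): there Python A raises
-- IndexError, except on some ragged grids where A happens to return False from an earlier row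
-- before reaching the short one (B raises IndexError on those too, so they stay excluded).
def Pre_kural_kontrol (bilgi_liste : List (List String)) : Prop :=
  ∀ row ∈ bilgi_liste, bilgi_liste.length ≤ row.length
instance (bilgi_liste : List (List String)) : Decidable (Pre_kural_kontrol bilgi_liste) := by
  unfold Pre_kural_kontrol; infer_instance

def pvWitness_kural_kontrol : List (List String) := [["B", "x"], ["x", "B"]]

def Spec_kural_kontrol (bilgi_liste : List (List String)) (out : Bool) : Prop := out = kural_kontrol_alt bilgi_liste
instance (bilgi_liste : List (List String)) (out : Bool) : Decidable (Spec_kural_kontrol bilgi_liste out) := by unfold Spec_kural_kontrol; infer_instance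

-- ===== CLAIM (what is proved, stated in full; the proofs are below) =====
def Claim_equal_kural_kontrol : Prop := ∀ (bilgi_liste : List (List String)), Dom_kural_kontrol bilgi_liste → Pre_kural_kontrol bilgi_liste → Spec_kural_kontrol bilgi_liste (kural_kontrol bilgi_liste)

-- ===== LEMMAS AND PROOFS =====

-- membership in a fold of conditional Set.add
theorem pv_mem_foldl_addIf {α β : Type} [BEq α] [LawfulBEq α]
    (l : List β) (s : PySem.Set α) (c : β → Bool) (f : β → α) (y : α) :
    (y ∈ l.foldl (fun s b => if c b then PySem.Set.add s (f b) else s) s) ↔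
      y ∈ s ∨ ∃ b ∈ l, c b = true ∧ y = f b := by
  induction l generalizing s with
  | nil => simp
  | cons b l ih =>
    simp only [List.foldl_cons, ih, List.mem_cons]
    split_ifs with hb
    · simp only [PySem.Set.mem_add]
      constructor
      · rintro (((h | h) | ⟨b', hb', hc, hy⟩))
        · exact Or.inl h
        · exact Or.inr ⟨b, Or.inl rfl, hb, h⟩
        · exact Or.inr ⟨b', Or.inr hb', hc, hy⟩
      · rintro (h | ⟨b', (rfl | hb'), hc, hy⟩)
        · exact Or.inl (Or.inl h)
        · exact Or.inl (Or.inr hy)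
        · exact Or.inr ⟨b', hb', hc, hy⟩
    · constructor
      · rintro (h | ⟨b', hb', hc, hy⟩)
        · exact Or.inl h
        · exact Or.inr ⟨b', Or.inr hb', hc, hy⟩
      · rintro (h | ⟨b', (rfl | hb'), hc, hy⟩)
        · exact Or.inl h
        · exact absurd hc hb
        · exact Or.inr ⟨b', hb', hc, hy⟩

-- the coordinate set B builds holds exactly the in-range 'B' cells
theorem pv_mem_bs (g : List (List String)) (y : Nat × Nat) :
    (y ∈ (List.range g.length).foldl (fun s i =>
        (List.range g.length).foldl (fun s j =>
          if pvCell g i j == "B" then PySem.Set.add s (i, j) else s) s)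
        PySem.Set.empty) ↔
      y.1 < g.length ∧ y.2 < g.length ∧ pvCell g y.1 y.2 = "B" := by
  have main : ∀ (l : List Nat) (s : PySem.Set (Nat × Nat)),
      (y ∈ l.foldl (fun s i =>
          (List.range g.length).foldl (fun s j =>
            if pvCell g i j == "B" then PySem.Set.add s (i, j) else s) s) s) ↔
        y ∈ s ∨ ∃ i ∈ l, ∃ j ∈ List.range g.length, pvCell g i j = "B" ∧ y = (i, j) := by
    intro l
    induction l with
    | nil => simp
    | cons i l ih =>
      intro s
      simp only [List.foldl_cons, ih,
        pv_mem_foldl_addIf (List.range g.length) s (fun j => pvCell g i j == "B") (fun j => (i, j)) y]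
      simp only [beq_iff_eq]
      constructor
      · rintro (((h | ⟨j, hj, hB, hy⟩) | h))
        · exact Or.inl h
        · exact Or.inr ⟨i, by simp, j, hj, hB, hy⟩
        · rcases h with ⟨i', hi', rest⟩
          exact Or.inr ⟨i', by simp [hi'], rest⟩
      · rintro (h | ⟨i', hi', j, hj, hB, hy⟩)
        · exact Or.inl (Or.inl h)
        · rcases List.mem_cons.mp hi' with h1 | h2
          · subst h1; exact Or.inl (Or.inr ⟨j, hj, hB, hy⟩)
          · exact Or.inr ⟨i', h2, j, hj, hB, hy⟩
  rw [main]
  rcases y with ⟨a, b⟩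
  simp only [PySem.Set.empty]
  constructor
  · rintro (h | ⟨i, hi, j, hj, hB, hy⟩)
    · simp at h
    · cases hy
      simp only [List.mem_range] at hi hj
      exact ⟨hi, hj, hB⟩
  · rintro ⟨ha, hb, hB⟩
    exact Or.inr ⟨a, List.mem_range.mpr ha, b, List.mem_range.mpr hb, hB, rfl⟩

-- A = true ↔ every in-range 'B' cell passes the four guarded neighbour checks
theorem pv_A_iff (g : List (List String)) :
    kural_kontrol g = true ↔
      ∀ i < g.length, ∀ j < g.length, pvCell g i j = "B" →
        (1 ≤ i → pvCell g (i - 1) j ≠ "B") ∧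
        (i + 1 < g.length → pvCell g (i + 1) j ≠ "B") ∧
        (1 ≤ j → pvCell g i (j - 1) ≠ "B") ∧
        (j + 1 < g.length → pvCell g i (j + 1) ≠ "B") := by
  unfold kural_kontrol
  simp only [List.all_eq_true, List.mem_range, beq_iff_eq]
  constructor
  · intro h i hi j hj hB
    have := h i hi j hj
    rw [if_pos hB] at this
    simp only [Bool.and_eq_true] at this
    obtain ⟨⟨⟨h1, h2⟩, h3⟩, h4⟩ := this
    refine ⟨?_, ?_, ?_, ?_⟩
    · intro hge
      have : ¬ ((i : Int) < 1) := by omega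
      rw [if_neg this] at h1; simpa using h1
    · intro hlt
      have : ¬ ((i : Int) > (g.length : Int) - 2) := by omega
      rw [if_neg this] at h2; simpa using h2
    · intro hge
      have : ¬ ((j : Int) < 1) := by omega
      rw [if_neg this] at h3; simpa using h3
    · intro hlt
      have : ¬ ((j : Int) > (g.length : Int) - 2) := by omega
      rw [if_neg this] at h4; simpa using h4
  · intro h i hi j hj
    by_cases hB : pvCell g i j = "B"
    · rw [if_pos hB]
      obtain ⟨h1, h2, h3, h4⟩ := h i hi j hj hB
      simp only [Bool.and_eq_true]
      refine ⟨⟨⟨?_, ?_⟩, ?_⟩, ?_⟩ <;> split_ifs with hc <;> try rfl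
      · simpa using h1 (by omega)
      · simpa using h2 (by omega)
      · simpa using h3 (by omega)
      · simpa using h4 (by omega)
    · rw [if_neg hB]

-- B = true ↔ no in-range 'B' cell has a 'B' at its forward neighbour (i+1,j) or (i,j+1)
theorem pv_B_iff (g : List (List String)) :
    kural_kontrol_alt g = true ↔
      ∀ i < g.length, ∀ j < g.length, pvCell g i j = "B" →
        ¬ (i + 1 < g.length ∧ j < g.length ∧ pvCell g (i + 1) j = "B") ∧
        ¬ (i < g.length ∧ j + 1 < g.length ∧ pvCell g i (j + 1) = "B") := by
  unfold kural_kontrol_alt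
  simp only [List.all_eq_true, Bool.not_or, Bool.and_eq_true, Bool.not_eq_true',
    ← Bool.not_eq_true, PySem.Set.contains_iff]
  constructor
  · intro h i hi j hj hB
    have := h (i, j) ((pv_mem_bs g (i, j)).mpr ⟨hi, hj, hB⟩)
    exact ⟨fun hc => this.1 ((pv_mem_bs g (i + 1, j)).mpr hc),
           fun hc => this.2 ((pv_mem_bs g (i, j + 1)).mpr hc)⟩
  · intro h p hp
    obtain ⟨hi, hj, hB⟩ := (pv_mem_bs g p).mp hp
    have := h p.1 hi p.2 hj hB
    exact ⟨fun hc => this.1 ((pv_mem_bs g (p.1 + 1, p.2)).mp hc),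
           fun hc => this.2 ((pv_mem_bs g (p.1, p.2 + 1)).mp hc)⟩

-- ===== VERDICT (by name: the statement is the Claim_ definition above) =====
theorem kural_kontrol_spec : Claim_equal_kural_kontrol := by
  intro g _ _
  unfold Spec_kural_kontrol
  rw [Bool.eq_iff_iff, pv_A_iff, pv_B_iff]
  constructor
  · intro h i hi j hj hB
    obtain ⟨_, h2, _, h4⟩ := h i hi j hj hB
    constructor
    · rintro ⟨hlt, _, hB'⟩; exact h2 hlt hB'
    · rintro ⟨_, hlt, hB'⟩; exact h4 hlt hB'
  · intro h i hi j hj hB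
    refine ⟨?_, ?_, ?_, ?_⟩
    · intro hge hB'
      have hi1 : i - 1 < g.length := by omega
      have := (h (i - 1) hi1 j hj hB').1
      have heq : i - 1 + 1 = i := by omega
      exact this ⟨by omega, hj, by rw [heq]; exact hB⟩
    · intro hlt hB'
      exact (h i hi j hj hB).1 ⟨hlt, hj, hB'⟩
    · intro hge hB'
      have hj1 : j - 1 < g.length := by omega
      have := (h i hi (j - 1) hj1 hB').2
      have heq : j - 1 + 1 = j := by omega
      exact this ⟨hi, by omega, by rw [heq]; exact hB⟩
    · intro hlt hB'
      exact (h i hi j hj hB).2 ⟨hi, hlt, hB'⟩
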